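-- pv_equiv track=rewrite | github.com/srajagopalan1204/kya_baat_hai | Root/Chk_Lst/src/checklist_builder_v5.py | find_steps_header_row
-- ===== SOURCE A (Python) =====
-- from typing import Any, Dict, List, Optional, Tuple
--
-- def norm(v: Any) -> str:
--     return "" if v is None else str(v).strip()
--
-- def low(v: Any) -> str:
--     return norm(v).lower()
--
-- STEP_COL_SYNONYMS = {
--     "order": {"order", "step", "step_no", "step number", "seq", "sequence"},
--     "id": {"id", "step_id", "code"},
--     "title": {"title", "step_title", "name"},
--     "command": {"command", "cmd", "procedure", "instructions"},
--     "reminder": {"reminder", "hints", "hint", "tips", "tip"},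
--     "notes": {"notes", "run_notes", "comments"},
--     "done": {"done", "status", "complete", "completed"},
-- }
--
-- def canon_step_col(name: str) -> Optional[str]:
--     ln = low(name)
--     for canon, syns in STEP_COL_SYNONYMS.items():
--         if ln in syns:
--             return canon
--     return None
--
-- def find_steps_header_row(rows: List[Tuple[Any, ...]]) -> Optional[int]:
--     """
--     Scan first ~30 rows for a header that contains at least 3 known step columns.
--     """
--     best_i = None
--     best_hits = 0
--     for i in range(min(30, len(rows))):
--         r = [norm(x) for x in rows[i]]
--         hits = 0
--         for cell in r:
--             if canon_step_col(cell):
--                 hits += 1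
--         if hits > best_hits:
--             best_hits = hits
--             best_i = i
--     if best_i is None or best_hits < 3:
--         return None
--     return best_i
-- ===== SOURCE B (Python) =====
-- # B: synonym-major scoring (count each synonym's occurrences in the normalized row)
-- # plus a structural recursion that compares the head row against the best of the tail,
-- # instead of A's cell-major membership test and left-to-right running-best loop.
-- _SYN_LIST = [
--     "order", "step", "step_no", "step number", "seq", "sequence",
--     "id", "step_id", "code",
--     "title", "step_title", "name",
--     "command", "cmd", "procedure", "instructions",
--     "reminder", "hints", "hint", "tips", "tip",
--     "notes", "run_notes", "comments",
--     "done", "status", "complete", "completed",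
-- ]
--
-- def find_steps_header_row(rows):
--     def score(row):
--         normed = [("" if c is None else str(c)).strip().lower() for c in row]
--         return sum(normed.count(s) for s in _SYN_LIST)
--
--     def best(rs, i):
--         # first index of the maximal score (head wins ties against the tail's best)
--         if not rs:
--             return (None, 0)
--         bi, bs = best(rs[1:], i + 1)
--         s = score(rs[0])
--         return (i, s) if bs <= s else (bi, bs)
--
--     bi, bs = best(rows[:30], 0)
--     return bi if bs >= 3 else None
-- ===== Notes on version B (the rewrite author's own statement) =====
-- stated objective: alternative
-- what changed: B scores each candidate row synonym-major (summing each synonym's occurrence count in the normalized row) instead of A's cell-major membership scan over the synonym dictionary, and selects the first maximal row by a structural recursion that compares the head row against the best of the tail, instead of A's left-to-right running-best loop with index bookkeeping.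
import Mathlib
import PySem

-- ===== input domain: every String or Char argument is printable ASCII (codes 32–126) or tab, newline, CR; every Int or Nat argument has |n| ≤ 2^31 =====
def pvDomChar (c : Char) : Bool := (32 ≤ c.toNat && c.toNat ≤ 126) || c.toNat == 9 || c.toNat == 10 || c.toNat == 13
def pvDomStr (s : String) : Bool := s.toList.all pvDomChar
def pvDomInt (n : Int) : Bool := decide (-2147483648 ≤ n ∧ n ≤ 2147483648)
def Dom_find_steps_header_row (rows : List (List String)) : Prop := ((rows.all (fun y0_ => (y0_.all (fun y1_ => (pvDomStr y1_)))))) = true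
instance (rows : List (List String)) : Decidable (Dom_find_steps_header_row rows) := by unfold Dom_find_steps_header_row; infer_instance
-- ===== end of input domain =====

-- B scores each row synonym-major (summing each synonym's occurrence count in the
-- normalized row) and selects the first maximum by structural recursion comparing the
-- head row against the best of the tail, instead of A's cell-major membership test and
-- left-to-right running-best loop (objective: alternative; same return value everywhere).

-- ===== PORT A =====
-- norm(v) for a string argument: str(v).strip()
def pvNorm (v : String) : String := PySem.Str.strip v
-- low(v) = norm(v).lower()
def pvLow (v : String) : String := PySem.Str.lower (PySem.Str.strip v)

def STEP_COL_SYNONYMS : List (String × List String) :=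
  [("order", ["order", "step", "step_no", "step number", "seq", "sequence"]),
   ("id", ["id", "step_id", "code"]),
   ("title", ["title", "step_title", "name"]),
   ("command", ["command", "cmd", "procedure", "instructions"]),
   ("reminder", ["reminder", "hints", "hint", "tips", "tip"]),
   ("notes", ["notes", "run_notes", "comments"]),
   ("done", ["done", "status", "complete", "completed"])]

-- for canon, syns in STEP_COL_SYNONYMS.items(): if ln in syns: return canon
def canon_step_col (name : String) : Option String :=
  let ln := pvLow name
  (STEP_COL_SYNONYMS.find? (fun p => p.2.contains ln)).map (fun p => p.1)

def find_steps_header_row (rows : List (List String)) : Option Int :=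
  -- best_i = None; best_hits = 0; for i in range(min(30, len(rows))): ...
  let st := (PySem.List.pyRange 0 (min 30 (rows.length : Int)) 1).foldl
    (fun (st : Option Int × Int) i =>
      let r := (PySem.List.pyGetD rows i []).map pvNorm   -- rows[i]: i always in range here
      let hits := r.foldl
        (fun h cell => if ((canon_step_col cell).getD "") ≠ "" then h + 1 else h) (0 : Int)
      if st.2 < hits then (some i, hits) else st)
    ((none : Option Int), (0 : Int))
  if st.1 = none ∨ st.2 < 3 then none else st.1

-- ===== PORT B =====
def SYN_LIST : List String :=
  ["order", "step", "step_no", "step number", "seq", "sequence",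
   "id", "step_id", "code",
   "title", "step_title", "name",
   "command", "cmd", "procedure", "instructions",
   "reminder", "hints", "hint", "tips", "tip",
   "notes", "run_notes", "comments",
   "done", "status", "complete", "completed"]

-- score(row): normed = [str(c).strip().lower() for c in row]; sum(normed.count(s) for s in _SYN_LIST)
def pvScore (row : List String) : Int :=
  let normed := row.map (fun c => PySem.Str.lower (PySem.Str.strip c))
  (SYN_LIST.map (fun s => (PySem.List.count normed s : Int))).sum

-- best(rs, i): head wins ties against the tail's best (rs[1:] is the tail)
def pvBest : List (List String) → Int → (Option Int × Int)
  | [], _ => (none, 0)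
  | r :: t, i =>
    let bibs := pvBest t (i + 1)
    let s := pvScore r
    if bibs.2 ≤ s then (some i, s) else bibs

def find_steps_header_row_alt (rows : List (List String)) : Option Int :=
  let bibs := pvBest (PySem.List.slice rows none (some 30)) 0
  if 3 ≤ bibs.2 then bibs.1 else none

-- ===== PRECONDITION & SPEC =====
def Spec_find_steps_header_row (rows : List (List String)) (out : Option Int) : Prop := out = find_steps_header_row_alt rows
instance (rows : List (List String)) (out : Option Int) : Decidable (Spec_find_steps_header_row rows out) := by unfold Spec_find_steps_header_row; infer_instance

-- ===== CLAIM (what is proved, stated in full; the proofs are below) =====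
def Claim_equal_find_steps_header_row : Prop := ∀ (rows : List (List String)), Dom_find_steps_header_row rows → Spec_find_steps_header_row rows (find_steps_header_row rows)

-- ===== LEMMAS AND PROOFS =====

set_option maxHeartbeats 1000000

-- A's per-row hit count, named for the proofs
def hitsA (row : List String) : Int :=
  (row.map pvNorm).foldl
    (fun h cell => if ((canon_step_col cell).getD "") ≠ "" then h + 1 else h) (0 : Int)

-- A's running-best loop as a structural recursion
def bestAux : List Int → Int → (Option Int × Int) → (Option Int × Int)
  | [], _, st => st
  | h :: t, k, st => bestAux t (k + 1) (if st.2 < h then (some k, h) else st)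

-- A's final step
def finishA (st : Option Int × Int) : Option Int :=
  if st.1 = none ∨ st.2 < 3 then none else st.1

theorem dropWhile_isspace_idem (m : List Char) :
    List.dropWhile PySem.Chars.isspace (List.dropWhile PySem.Chars.isspace m)
      = List.dropWhile PySem.Chars.isspace m := by
  rcases hd : List.dropWhile PySem.Chars.isspace m with _ | ⟨c, cs⟩
  · rfl
  · have hne : List.dropWhile PySem.Chars.isspace m ≠ [] := by rw [hd]; simp
    have hc := List.head_dropWhile_not (p := PySem.Chars.isspace) (l := m) hne
    have hhead : (List.dropWhile PySem.Chars.isspace m).head hne = c := by simp [hd]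
    rw [hhead] at hc
    try simp at hc
    simp [hc]

theorem lstrip_idem (l : List Char) : PySem.Chars.lstrip (PySem.Chars.lstrip l) = PySem.Chars.lstrip l := by
  show List.dropWhile PySem.Chars.isspace (List.dropWhile PySem.Chars.isspace l)
      = List.dropWhile PySem.Chars.isspace l
  exact dropWhile_isspace_idem l

theorem rstrip_idem (l : List Char) : PySem.Chars.rstrip (PySem.Chars.rstrip l) = PySem.Chars.rstrip l := by
  simp [PySem.Chars.rstrip]
  have := lstrip_idem l.reverse
  simpa [PySem.Chars.lstrip] using this

theorem lstrip_rstrip_lstrip (l : List Char) :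
    PySem.Chars.lstrip (PySem.Chars.rstrip (PySem.Chars.lstrip l)) = PySem.Chars.rstrip (PySem.Chars.lstrip l) := by
  set u := PySem.Chars.lstrip l with hu
  have hpre : PySem.Chars.rstrip u <+: u := by
    have h1 : List.dropWhile PySem.Chars.isspace u.reverse <:+ u.reverse := List.dropWhile_suffix _
    simpa [PySem.Chars.rstrip] using h1.reverse
  rcases hpre with ⟨t, ht⟩
  rcases hr : PySem.Chars.rstrip u with _ | ⟨c, cs⟩
  · simp [PySem.Chars.lstrip]
  · have hc : u.dropWhile PySem.Chars.isspace = u := lstrip_idem l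
    have hcu : ∃ rest, u = c :: rest := by
      rw [hr] at ht; exact ⟨cs ++ t, by simpa using ht.symm⟩
    rcases hcu with ⟨rest, hrest⟩
    have hcns : PySem.Chars.isspace c = false := by
      by_contra h
      have h' : PySem.Chars.isspace c = true := by revert h; cases PySem.Chars.isspace c <;> simp
      rw [hrest] at hc
      simp [h'] at hc
      have := congrArg List.length hc
      simp at this
      have := List.length_dropWhile_le (p := PySem.Chars.isspace) (l := rest)
      omega
    simp [PySem.Chars.lstrip, hcns]

theorem chars_strip_idem (l : List Char) : PySem.Chars.strip (PySem.Chars.strip l) = PySem.Chars.strip l := by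
  show PySem.Chars.rstrip (PySem.Chars.lstrip (PySem.Chars.rstrip (PySem.Chars.lstrip l))) = _
  rw [lstrip_rstrip_lstrip, rstrip_idem]
  rfl

theorem str_strip_idem (s : String) : PySem.Str.strip (PySem.Str.strip s) = PySem.Str.strip s := by
  have h2 : (PySem.Str.strip (PySem.Str.strip s)).toList = (PySem.Str.strip s).toList := by
    simpa [PySem.Str.toList_strip] using chars_strip_idem s.toList
  exact String.toList_inj.mp h2

theorem canon_iff (ln : String) :
    (((STEP_COL_SYNONYMS.find? (fun p => p.2.contains ln)).map (fun p => p.1)).getD "" ≠ "")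
      ↔ SYN_LIST.contains ln = true := by
  simp only [STEP_COL_SYNONYMS, SYN_LIST, List.find?, List.contains_cons, List.contains_nil]
  (repeat' split) <;> simp_all <;> tauto

theorem cell_cond (cell : String) :
    (((canon_step_col (pvNorm cell)).getD "") ≠ "")
      ↔ SYN_LIST.contains (PySem.Str.lower (PySem.Str.strip cell)) = true := by
  have hln : pvLow (pvNorm cell) = PySem.Str.lower (PySem.Str.strip cell) := by
    simp [pvLow, pvNorm, str_strip_idem]
  show (((STEP_COL_SYNONYMS.find? (fun p => p.2.contains (pvLow (pvNorm cell)))).map (fun p => p.1)).getD "" ≠ "")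
      ↔ SYN_LIST.contains (PySem.Str.lower (PySem.Str.strip cell)) = true
  rw [hln]
  exact canon_iff _

-- ∑_{s ∈ S} (if c == s then 1 else 0) is the membership indicator, for S without duplicates
theorem sum_indicator (c : String) : ∀ (S : List String), S.Nodup →
    (S.map (fun s => if (c == s) = true then (1 : Int) else 0)).sum
      = if S.contains c then (1 : Int) else 0 := by
  intro S
  induction S with
  | nil => intro _; simp
  | cons s0 S ih =>
    intro hnd
    rcases List.nodup_cons.mp hnd with ⟨hs0, hnd'⟩
    simp only [List.map_cons, List.sum_cons, ih hnd', List.contains_cons]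
    by_cases hc : c = s0
    · subst hc
      simp [hs0]
      try exact hs0
    · simp [hc, beq_iff_eq]

-- synonym-major sum of counts = cell-major membership count, for a duplicate-free synonym list
theorem sum_counts (S : List String) (hS : S.Nodup) : ∀ (l : List String),
    (S.map (fun s => (List.count s l : Int))).sum = (l.countP (fun c => S.contains c) : Int) := by
  intro l
  induction l with
  | nil => simp
  | cons c l ih =>
    have hcc : ∀ s : String, (List.count s (c :: l) : Int)
        = (List.count s l : Int) + (if (c == s) = true then (1 : Int) else 0) := by
      intro s
      rw [List.count_cons]
      split <;> push_cast <;> ring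
    calc (S.map (fun s => (List.count s (c :: l) : Int))).sum
        = (S.map (fun s => (List.count s l : Int) + (if (c == s) = true then (1 : Int) else 0))).sum := by
          exact congrArg List.sum (List.map_congr_left (fun s _ => hcc s))
      _ = (S.map (fun s => (List.count s l : Int))).sum
          + (S.map (fun s => if (c == s) = true then (1 : Int) else 0)).sum :=
          PySem.List.sum_map_add_int S _ _
      _ = ((l.countP (fun c => S.contains c)) : Int) + (if S.contains c then (1 : Int) else 0) := by
          rw [ih, sum_indicator c S hS]
      _ = (((c :: l).countP (fun c => S.contains c)) : Int) := by
          rw [List.countP_cons]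
          split <;> push_cast <;> ring

theorem hitsA_eq_pvScore (row : List String) : hitsA row = pvScore row := by
  unfold hitsA pvScore
  have key := PySem.List.foldl_count_if
    (fun cell => decide (((canon_step_col cell).getD "") ≠ "")) (row.map pvNorm) 0
  simp only [decide_eq_true_eq] at key
  rw [key]
  have hcount : ∀ s : String,
      PySem.List.count (row.map (fun c => PySem.Str.lower (PySem.Str.strip c))) s
        = List.count s (row.map (fun c => PySem.Str.lower (PySem.Str.strip c))) := by
    intro s; simp [PySem.List.count_eq]
  simp only [hcount]
  rw [sum_counts SYN_LIST (by decide) _]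
  rw [List.countP_map, List.countP_map]
  simp only [zero_add]
  refine congrArg Nat.cast (List.countP_congr (fun x _ => ?_))
  simp only [Function.comp_apply]
  by_cases hb : SYN_LIST.contains (PySem.Str.lower (PySem.Str.strip x)) = true
  · rw [hb, decide_eq_true ((cell_cond x).mpr hb)]
  · have hb' : SYN_LIST.contains (PySem.Str.lower (PySem.Str.strip x)) = false := by
      simpa using hb
    have hnc : ¬ ((canon_step_col (pvNorm x)).getD "" ≠ "") := fun h => by
      have hcontra := (cell_cond x).mp h
      rw [hb'] at hcontra
      exact Bool.false_ne_true hcontra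
    rw [hb', decide_eq_false hnc]

theorem hitsA_nonneg (row : List String) : 0 ≤ hitsA row := by
  unfold hitsA
  generalize (row.map pvNorm) = l
  suffices h : ∀ (l : List String) (a : Int), a ≤ l.foldl
      (fun h cell => if ((canon_step_col cell).getD "") ≠ "" then h + 1 else h) a by
    exact h l 0
  intro l
  induction l with
  | nil => intro a; simp
  | cons c t ih =>
    intro a
    simp only [List.foldl_cons]
    have := ih (if ((canon_step_col c).getD "") ≠ "" then a + 1 else a)
    split_ifs at this ⊢ <;> omega

theorem bestAux_of_all_le (l : List Int) : ∀ (k : Int) (st : Option Int × Int),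
    (∀ x ∈ l, x ≤ st.2) → bestAux l k st = st := by
  induction l with
  | nil => intro k st _; rfl
  | cons h t ih =>
    intro k st hle
    simp only [bestAux]
    rw [if_neg (by have := hle h (by simp); omega)]
    exact ih _ _ (fun x hx => hle x (by simp [hx]))

theorem bestAux_update (l : List Int) : ∀ (k : Int) (st : Option Int × Int),
    st.2 < l.foldl max st.2 →
    ∃ j : Nat, ∃ hj : j < l.length,
      bestAux l k st = (some (k + j), l.foldl max st.2) ∧
      l[j] = l.foldl max st.2 ∧
      ∀ i, (hi : i < l.length) → i < j → l[i] < l.foldl max st.2 := by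
  induction l with
  | nil => intro k st h; simp at h
  | cons h t ih =>
    intro k st hlt
    simp only [List.foldl_cons] at hlt ⊢
    by_cases h1 : st.2 < h
    · have hmax : max st.2 h = h := max_eq_right (le_of_lt h1)
      rw [hmax] at hlt ⊢
      simp only [bestAux, if_pos h1]
      by_cases h2 : h < t.foldl max h
      · rcases ih (k + 1) (some k, h) h2 with ⟨j', hj', heq, hget, hbefore⟩
        refine ⟨j' + 1, by simpa using Nat.succ_lt_succ hj', ?_, ?_, ?_⟩
        · rw [heq]; congr 2; push_cast; ring
        · simpa using hget
        · intro i hi hij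
          match i, hi with
          | 0, _ => simpa using h2
          | (i+1), hi =>
            have : i < j' := by omega
            simpa using hbefore i (by simpa using Nat.lt_of_succ_lt_succ hi) this
      · have hFh : t.foldl max h = h :=
          le_antisymm (by omega) ((PySem.List.le_foldl_max t h).1)
        refine ⟨0, by simp, ?_, by simpa using hFh.symm, by intro i hi hij; omega⟩
        rw [bestAux_of_all_le t (k+1) (some k, h)
          (fun x hx => by have := (PySem.List.le_foldl_max t h).2 x hx; omega)]
        simp [hFh]
    · have hmax : max st.2 h = st.2 := max_eq_left (by omega)
      rw [hmax] at hlt ⊢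
      simp only [bestAux, if_neg h1]
      rcases ih (k + 1) st hlt with ⟨j', hj', heq, hget, hbefore⟩
      refine ⟨j' + 1, by simpa using Nat.succ_lt_succ hj', ?_, by simpa using hget, ?_⟩
      · rw [heq]; congr 2; push_cast; ring
      · intro i hi hij
        match i, hi with
        | 0, _ => simp; omega
        | (i+1), hi =>
          have : i < j' := by omega
          simpa using hbefore i (by simpa using Nat.lt_of_succ_lt_succ hi) this

theorem loopA_gen (xs : List (List String)) : ∀ (rows : List (List String)) (a : Int)
    (st : Option Int × Int),
    (∀ (k : Nat), (hk : k < xs.length) → PySem.List.pyGetD rows (a + k) ([] : List String) = xs[k]) →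
    (PySem.List.pyRange a (a + xs.length) 1).foldl
      (fun (st : Option Int × Int) i =>
        let r := (PySem.List.pyGetD rows i []).map pvNorm
        let hits := r.foldl
          (fun h cell => if ((canon_step_col cell).getD "") ≠ "" then h + 1 else h) (0 : Int)
        if st.2 < hits then (some i, hits) else st) st
    = bestAux (xs.map hitsA) a st := by
  induction xs with
  | nil =>
    intro rows a st _
    rw [show a + ((List.length ([] : List (List String)) : Int)) = a by simp]
    rw [PySem.List.pyRange_one_eq_nil (le_refl a)]
    rfl
  | cons x t ih =>
    intro rows a st hget
    have hlt : a < a + ((x :: t).length : Int) := by simp only [List.length_cons]; push_cast; omega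
    rw [PySem.List.pyRange_one_cons hlt]
    simp only [List.foldl_cons]
    have h0 : PySem.List.pyGetD rows a ([] : List String) = x := by
      have := hget 0 (by simp)
      simpa using this
    rw [h0]
    have hrange : a + ((x :: t).length : Int) = (a + 1) + (t.length : Int) := by
      simp only [List.length_cons]; push_cast; ring
    rw [hrange]
    rw [ih rows (a + 1) _ (fun k hk => by
      have := hget (k + 1) (by simpa using Nat.succ_lt_succ hk)
      rw [show (a + 1) + (k : Int) = a + ((k + 1 : Nat) : Int) by push_cast; ring]
      simpa using this)]
    simp only [List.map_cons, bestAux, hitsA]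

theorem A_eq_finishA (rows : List (List String)) :
    find_steps_header_row rows = finishA (bestAux ((rows.take 30).map hitsA) 0 (none, 0)) := by
  unfold find_steps_header_row finishA
  have hlen : min (30 : Int) (rows.length : Int) = 0 + ((rows.take 30).length : Int) := by
    push_cast [List.length_take]
    omega
  rw [hlen]
  rw [loopA_gen (rows.take 30) rows 0 (none, 0) (fun k hk => by
    have hk' : k < rows.length := by
      simp [List.length_take] at hk; omega
    rw [show (0 : Int) + (k : Int) = ((k : Nat) : Int) by ring]
    rw [PySem.List.pyGetD_natCast]
    rw [List.getD_eq_getElem _ _ hk']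
    rw [List.getElem_take])]

theorem pvScore_nonneg (row : List String) : 0 ≤ pvScore row := by
  rw [← hitsA_eq_pvScore]
  exact hitsA_nonneg row

-- unfolding equation for B's recursion
theorem pvBest_cons (r : List String) (t : List (List String)) (i : Int) :
    pvBest (r :: t) i =
      if (pvBest t (i + 1)).2 ≤ pvScore r then (some i, pvScore r) else pvBest t (i + 1) := rfl

-- B's recursion with the scoring abstracted out
def bestR : List Int → Int → (Option Int × Int)
  | [], _ => (none, 0)
  | s :: t, k => let b := bestR t (k + 1); if b.2 ≤ s then (some k, s) else b

theorem bestR_cons (s : Int) (t : List Int) (k : Int) :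
    bestR (s :: t) k = if (bestR t (k + 1)).2 ≤ s then (some k, s) else bestR t (k + 1) := rfl

theorem pvBest_eq_bestR : ∀ (rs : List (List String)) (k : Int),
    pvBest rs k = bestR (rs.map pvScore) k := by
  intro rs
  induction rs with
  | nil => intro k; rfl
  | cons r t ih =>
    intro k
    rw [pvBest_cons, List.map_cons, bestR_cons, ih]

theorem foldl_max_cons (s : Int) (t : List Int) :
    (s :: t).foldl max 0 = max s (t.foldl max 0) := by
  simp only [List.foldl_cons]
  rw [show max (0 : Int) s = max s 0 from max_comm _ _]
  exact List.foldl_assoc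

-- B's recursion returns (first index of the maximal element, that maximum)
theorem bestR_char : ∀ (l : List Int) (k : Int), l ≠ [] → (∀ x ∈ l, 0 ≤ x) →
    ∃ j : Nat, ∃ hj : j < l.length,
      bestR l k = (some (k + j), l.foldl max 0) ∧
      l[j] = l.foldl max 0 ∧
      ∀ i, (hi : i < l.length) → i < j → l[i] < l.foldl max 0 := by
  intro l
  induction l with
  | nil => intro k h _; exact absurd rfl h
  | cons s t ih =>
    intro k _ hnn
    have hM := foldl_max_cons s t
    cases t with
    | nil =>
      have h0 : (0 : Int) ≤ s := hnn s (by simp)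
      have hM' : ([s] : List Int).foldl max 0 = s := by
        simp [max_eq_right h0]
      refine ⟨0, by simp, ?_, by simpa using hM', by intro i hi hij; omega⟩
      rw [bestR_cons, hM']
      show (if ((none : Option Int), (0 : Int)).2 ≤ s then (some k, s) else ((none : Option Int), (0 : Int)))
          = (some (k + ((0 : Nat) : Int)), s)
      rw [if_pos h0]
      simp
    | cons s2 t2 =>
      rcases ih (k + 1) (by simp) (fun x hx => hnn x (by simp [hx])) with ⟨j', hj', heq, hget, hbefore⟩
      by_cases hc : (s2 :: t2).foldl max 0 ≤ s
      · refine ⟨0, by simp, ?_, ?_, by intro i hi hij; omega⟩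
        · rw [bestR_cons, heq, hM, max_eq_left hc]
          rw [if_pos (show (some (k + 1 + (j' : Int)), List.foldl max 0 (s2 :: t2)).2 ≤ s from hc)]
          simp
        · rw [hM, max_eq_left hc]
          simp
      · have hlt : s < (s2 :: t2).foldl max 0 := not_le.mp hc
        refine ⟨j' + 1, by simpa using Nat.succ_lt_succ hj', ?_, ?_, ?_⟩
        · rw [bestR_cons, heq, hM, max_eq_right (le_of_lt hlt)]
          rw [if_neg (by simpa using not_le.mpr hlt)]
          congr 2
          push_cast
          ring
        · rw [hM, max_eq_right (le_of_lt hlt)]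
          simpa using hget
        · intro i hi hij
          rw [hM, max_eq_right (le_of_lt hlt)]
          match i, hi with
          | 0, _ => simpa using hlt
          | (i+1), hi =>
            have : i < j' := by omega
            simpa using hbefore i (by simpa using Nat.lt_of_succ_lt_succ hi) this

-- the first index attaining the maximum is unique
theorem first_argmax_unique {l : List Int} {M : Int} {j1 j2 : Nat}
    (hj1 : j1 < l.length) (hj2 : j2 < l.length)
    (hg1 : l[j1] = M) (hb1 : ∀ i, (hi : i < l.length) → i < j1 → l[i] < M)
    (hg2 : l[j2] = M) (hb2 : ∀ i, (hi : i < l.length) → i < j2 → l[i] < M) :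
    j1 = j2 := by
  rcases lt_trichotomy j1 j2 with h | h | h
  · have := hb2 j1 hj1 h; omega
  · exact h
  · have := hb1 j2 hj2 h; omega

theorem key_select (l : List Int) (hnn : ∀ x ∈ l, 0 ≤ x) :
    finishA (bestAux l 0 (none, 0)) = (if 3 ≤ (bestR l 0).2 then (bestR l 0).1 else none) := by
  cases l with
  | nil => rfl
  | cons h t =>
    rcases bestR_char (h :: t) 0 (by simp) hnn with ⟨j, hj, heqB, hgetB, hbeforeB⟩
    have hM0 : (0 : Int) ≤ (h :: t).foldl max 0 := (PySem.List.le_foldl_max (h :: t) 0).1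
    rw [heqB]
    by_cases hpos : (0 : Int) < (h :: t).foldl max 0
    · obtain ⟨jA, hjA, heqA, hgetA, hbeforeA⟩ :=
        bestAux_update (h :: t) 0 ((none : Option Int), (0 : Int)) (by simpa using hpos)
      have hjj : jA = j :=
        first_argmax_unique hjA hj (by simpa using hgetA)
          (fun i hi hij => by simpa using hbeforeA i hi hij) hgetB hbeforeB
      unfold finishA
      rw [heqA, hjj]
      show (if some ((0 : Int) + (j : Int)) = none ∨ (h :: t).foldl max 0 < 3 then none
              else some ((0 : Int) + (j : Int)))
          = (if (3 : Int) ≤ (h :: t).foldl max 0 then some ((0 : Int) + (j : Int)) else none)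
      by_cases h3 : (3 : Int) ≤ (h :: t).foldl max 0
      · rw [if_pos h3, if_neg (by
          rintro (hbad | hbad)
          · simp at hbad
          · omega)]
      · rw [if_neg h3, if_pos (Or.inr (by omega))]
    · have hMz : (h :: t).foldl max 0 = 0 := le_antisymm (by omega) hM0
      have hall : ∀ x ∈ h :: t, x ≤ ((none : Option Int), (0 : Int)).2 := fun x hx => by
        have := (PySem.List.le_foldl_max (h :: t) 0).2 x hx
        simp
        omega
      unfold finishA
      rw [bestAux_of_all_le _ _ _ hall, if_pos (Or.inl rfl)]
      show (none : Option Int)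
          = (if (3 : Int) ≤ (h :: t).foldl max 0 then some ((0 : Int) + (j : Int)) else none)
      rw [if_neg (by omega)]

theorem find_steps_header_row_eq (rows : List (List String)) :
    find_steps_header_row rows = find_steps_header_row_alt rows := by
  rw [A_eq_finishA]
  unfold find_steps_header_row_alt
  have hs : PySem.List.slice rows none (some (30 : Int)) = rows.take 30 := by
    have := PySem.List.slice_to (xs := rows) (b := (30 : Int)) (by norm_num)
    simpa using this
  rw [hs, pvBest_eq_bestR]
  rw [show (rows.take 30).map hitsA = (rows.take 30).map pvScore from
    List.map_congr_left (fun x _ => hitsA_eq_pvScore x)]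
  refine key_select ((rows.take 30).map pvScore) ?_
  intro x hx
  rcases List.mem_map.mp hx with ⟨r, _, rfl⟩
  exact pvScore_nonneg r

-- ===== VERDICT (by name: the statement is the Claim_ definition above) =====
theorem find_steps_header_row_spec : Claim_equal_find_steps_header_row := by
  intro rows _
  unfold Spec_find_steps_header_row
  exact find_steps_header_row_eq rows
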